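-- pv_equiv track=rewrite | github.com/payel-bhunia/pythonProgramming | Hashing/rightTriangle.py | solve
-- ===== SOURCE A (Python) =====
-- def solve(A, B):
--     hash_map = {}
--     n = len(A)
--     for i in range(n):
--         if A[i] not in hash_map:
--             hash_map[(A[i],B[i])] = 1
--         else:
--             hash_map[(A[i],B[i])] += 1
--     count = 0
--     max_val = 0
--     for i in range(n):
--         for j in range(i+1,n):
--             third1 = (A[i],B[j])
--             third2 = (A[j],B[i])
--             if third1 != (A[i],B[i]) and third1 != (A[j],B[j]):
--                 if third1 in hash_map:
--                     count += 1
--             if third2 != (A[i], B[i]) and third2 != (A[j], B[j]):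
--                 if third2 in hash_map:
--                     count += 1
--         max_val = max(max_val,count)
--     return max_val
-- ===== SOURCE B (Python) =====
-- def solve(A, B):
--     n = len(A)
--     cntA = {}
--     cntB = {}
--     cntP = {}
--     for i in range(n):
--         a, b = A[i], B[i]
--         cntA[a] = cntA.get(a, 0) + 1
--         cntB[b] = cntB.get(b, 0) + 1
--         cntP[(a, b)] = cntP.get((a, b), 0) + 1
--     g = {}
--     for (x, y) in cntP:
--         g[x] = g.get(x, 0) + cntB[y]
--     total = 0
--     for i in range(n):
--         a, b = A[i], B[i]
--         total += g[a] - cntB[b] - cntA[a] + cntP[(a, b)]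
--     return total
-- ===== Notes on version B (the rewrite author's own statement) =====
-- stated objective: faster
-- what changed: Replaces A's O(n^2) scan over all index pairs (and its redundant running max of a non-decreasing counter) with an O(n) pass: build count dicts for A-values, B-values and points, aggregate per-x sums of B-value counts over the distinct points, and sum an inclusion-exclusion formula per point.
import Mathlib
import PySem

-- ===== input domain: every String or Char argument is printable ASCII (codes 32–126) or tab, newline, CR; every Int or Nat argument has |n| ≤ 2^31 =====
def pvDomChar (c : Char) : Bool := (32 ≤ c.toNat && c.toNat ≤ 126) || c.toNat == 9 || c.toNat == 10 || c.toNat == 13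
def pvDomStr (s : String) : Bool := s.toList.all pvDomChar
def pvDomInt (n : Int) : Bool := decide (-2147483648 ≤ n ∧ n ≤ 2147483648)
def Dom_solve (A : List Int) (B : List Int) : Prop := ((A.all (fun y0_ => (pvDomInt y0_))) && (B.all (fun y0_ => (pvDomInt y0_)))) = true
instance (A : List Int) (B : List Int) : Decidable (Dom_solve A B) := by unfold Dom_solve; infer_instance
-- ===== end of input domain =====

-- B replaces A's O(n^2) pair scan by an O(n) inclusion–exclusion over row/column/point counters;
-- the proved equivalence is about the return value on inputs with len(A) ≤ len(B).

-- ===== PORT A =====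
-- Python's `A[i] not in hash_map` compares the int A[i] against the stored pair keys, so
-- (int == tuple being always False in Python) it never finds a match; ported exactly with
-- tagged keys (Bool × Int × Int): pvKeyInt tags the int queries, pvKeyPair the pair keys,
-- and the two tags never collide.
def pvKeyInt (z : Int) : Bool × Int × Int := (false, z, 0)
def pvKeyPair (p : Int × Int) : Bool × Int × Int := (true, p.1, p.2)

def solve (A : List Int) (B : List Int) : Int :=
  let n : Int := A.length
  let hash_map : PySem.Dict (Bool × Int × Int) Int :=
    (PySem.List.pyRange 0 n 1).foldl (fun hm i =>
      if ¬ hm.contains (pvKeyInt (PySem.List.pyGetD A i 0)) then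
        hm.insert (pvKeyPair (PySem.List.pyGetD A i 0, PySem.List.pyGetD B i 0)) 1
      else
        -- `hash_map[(A[i],B[i])] += 1`; this branch is unreachable (the test above is always True)
        hm.modify (pvKeyPair (PySem.List.pyGetD A i 0, PySem.List.pyGetD B i 0)) 0 (· + 1))
      PySem.Dict.empty
  let cm : Int × Int :=
    (PySem.List.pyRange 0 n 1).foldl (fun (s : Int × Int) i =>
      let count :=
        (PySem.List.pyRange (i + 1) n 1).foldl (fun count j =>
          let third1 := (PySem.List.pyGetD A i 0, PySem.List.pyGetD B j 0)
          let third2 := (PySem.List.pyGetD A j 0, PySem.List.pyGetD B i 0)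
          let count :=
            if third1 ≠ (PySem.List.pyGetD A i 0, PySem.List.pyGetD B i 0) ∧
               third1 ≠ (PySem.List.pyGetD A j 0, PySem.List.pyGetD B j 0) then
              if hash_map.contains (pvKeyPair third1) then count + 1 else count
            else count
          if third2 ≠ (PySem.List.pyGetD A i 0, PySem.List.pyGetD B i 0) ∧
             third2 ≠ (PySem.List.pyGetD A j 0, PySem.List.pyGetD B j 0) then
            if hash_map.contains (pvKeyPair third2) then count + 1 else count
          else count) s.1
      (count, max s.2 count)) (0, 0)
  cm.2
-- ===== PORT B =====
def solve_alt (A : List Int) (B : List Int) : Int :=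
  let n : Int := A.length
  let c :=
    (PySem.List.pyRange 0 n 1).foldl
      (fun (c : PySem.Dict Int Int × PySem.Dict Int Int × PySem.Dict (Int × Int) Int) i =>
        let a := PySem.List.pyGetD A i 0
        let b := PySem.List.pyGetD B i 0
        (c.1.insert a (c.1.getD a 0 + 1),
         c.2.1.insert b (c.2.1.getD b 0 + 1),
         c.2.2.insert (a, b) (c.2.2.getD (a, b) 0 + 1)))
      (PySem.Dict.empty, PySem.Dict.empty, PySem.Dict.empty)
  let cntA := c.1
  let cntB := c.2.1
  let cntP := c.2.2
  let g : PySem.Dict Int Int :=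
    cntP.keys.foldl (fun g xy => g.insert xy.1 (g.getD xy.1 0 + cntB.getD xy.2 0)) PySem.Dict.empty
  (PySem.List.pyRange 0 n 1).foldl (fun total i =>
    let a := PySem.List.pyGetD A i 0
    let b := PySem.List.pyGetD B i 0
    total + g.getD a 0 - cntB.getD b 0 - cntA.getD a 0 + cntP.getD (a, b) 0) 0

-- ===== PRECONDITION & SPEC =====
-- Pre_: A evaluates B[i] for every i < len(A), so it raises IndexError when len(B) < len(A);
-- exactly those inputs are excluded.
def Pre_solve (A : List Int) (B : List Int) : Prop := A.length ≤ B.length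
instance (A : List Int) (B : List Int) : Decidable (Pre_solve A B) := by unfold Pre_solve; infer_instance
def pvWitness_solve : List Int × List Int := ([1, 1, 2], [1, 2, 1])
def Spec_solve (A : List Int) (B : List Int) (out : Int) : Prop := out = solve_alt A B
instance (A : List Int) (B : List Int) (out : Int) : Decidable (Spec_solve A B out) := by unfold Spec_solve; infer_instance

-- ===== CLAIM (what is proved, stated in full; the proofs are below) =====
def Claim_equal_solve : Prop := ∀ (A : List Int) (B : List Int), Dom_solve A B → Pre_solve A B → Spec_solve A B (solve A B)

-- ===== LEMMAS AND PROOFS =====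

-- the point list, the pair indicator, and the common double sum both ports are reduced to
def pvPts (A B : List Int) : List (Int × Int) :=
  (List.range A.length).map (fun i => (A.getD i 0, B.getD i 0))

def pvF (A B : List Int) (i j : Nat) : Int :=
  if (A.getD i 0, B.getD j 0) ∈ pvPts A B ∧ B.getD j 0 ≠ B.getD i 0 ∧ A.getD i 0 ≠ A.getD j 0
  then 1 else 0

def pvS (A B : List Int) : Int :=
  ∑ i ∈ Finset.range A.length, ∑ j ∈ Finset.range A.length, pvF A B i j

-- generic toolbox
theorem pv_sum_range_map (f : Nat → Int) (n : Nat) :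
    ((List.range n).map f).sum = ∑ i ∈ Finset.range n, f i := by
  induction n with
  | zero => simp
  | succ n ih => simp [List.range_succ, Finset.sum_range_succ, ih]

theorem pv_sumInd {α : Type} [BEq α] [LawfulBEq α] [DecidableEq α] (f : Nat → α) (v : α) (n : Nat) :
    (∑ j ∈ Finset.range n, if f j = v then (1 : Int) else 0)
      = (((List.range n).map f).count v : Int) := by
  induction n with
  | zero => simp
  | succ n ih =>
    rw [Finset.sum_range_succ, List.range_succ, ih]
    simp [List.count_append, List.count_singleton]

theorem pv_sym (f : Nat → Nat → Int) (hd : ∀ i, f i i = 0) (n : Nat) :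
    (∑ i ∈ Finset.range n, ∑ j ∈ Finset.Ico (i + 1) n, (f i j + f j i))
      = ∑ i ∈ Finset.range n, ∑ j ∈ Finset.range n, f i j := by
  induction n with
  | zero => simp
  | succ n ih =>
    rw [Finset.sum_range_succ, Finset.sum_range_succ]
    have h1 : ∀ i ∈ Finset.range n, (∑ j ∈ Finset.Ico (i+1) (n+1), (f i j + f j i))
        = (∑ j ∈ Finset.Ico (i+1) n, (f i j + f j i)) + (f i n + f n i) := by
      intro i hi
      have hi' := Finset.mem_range.mp hi
      rw [Finset.sum_Ico_succ_top (by omega)]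
    rw [Finset.sum_congr rfl h1, Finset.Ico_self, Finset.sum_empty]
    simp only [Finset.sum_add_distrib] at ih ⊢
    rw [ih]
    have h2 : ∀ i ∈ Finset.range n, (∑ j ∈ Finset.range (n+1), f i j)
        = (∑ j ∈ Finset.range n, f i j) + f i n := fun i _ => Finset.sum_range_succ _ _
    rw [Finset.sum_congr rfl h2, Finset.sum_range_succ (f n) n, hd, Finset.sum_add_distrib]
    ring

-- ----- A side -----

-- ----- A side: hash_map is the set of points; the running max is the final count -----
def pvHMStep (A B : List Int) (hm : PySem.Dict (Bool × Int × Int) Int) (i : Int) :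
    PySem.Dict (Bool × Int × Int) Int :=
  if ¬ hm.contains (pvKeyInt (PySem.List.pyGetD A i 0)) then
    hm.insert (pvKeyPair (PySem.List.pyGetD A i 0, PySem.List.pyGetD B i 0)) 1
  else
    hm.modify (pvKeyPair (PySem.List.pyGetD A i 0, PySem.List.pyGetD B i 0)) 0 (· + 1)

def pvHM (A B : List Int) : PySem.Dict (Bool × Int × Int) Int :=
  (PySem.List.pyRange 0 (A.length : Int) 1).foldl (pvHMStep A B) PySem.Dict.empty

theorem pvHM_fold_contains (A B : List Int) (l : List Int)
    (hm : PySem.Dict (Bool × Int × Int) Int)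
    (h0 : ∀ z, hm.contains (pvKeyInt z) = false) :
    (∀ z, (l.foldl (pvHMStep A B) hm).contains (pvKeyInt z) = false) ∧
    (∀ p, (l.foldl (pvHMStep A B) hm).contains (pvKeyPair p)
        = (hm.contains (pvKeyPair p)
           || decide (p ∈ l.map (fun i => (PySem.List.pyGetD A i 0, PySem.List.pyGetD B i 0))))) := by
  induction l generalizing hm with
  | nil => simp [h0]
  | cons i l ih =>
    simp only [List.foldl_cons, pvHMStep, h0, if_pos, Bool.false_eq_true, not_false_iff]
    have h0' : ∀ z, (hm.insert (pvKeyPair (PySem.List.pyGetD A i 0, PySem.List.pyGetD B i 0)) 1).contains (pvKeyInt z) = false := by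
      intro z
      rw [PySem.Dict.contains_insert]
      simp [pvKeyInt, pvKeyPair]
      exact h0 z
    refine ⟨(ih _ h0').1, fun p => ?_⟩
    rw [(ih _ h0').2 p, PySem.Dict.contains_insert]
    by_cases hp : p = (PySem.List.pyGetD A i 0, PySem.List.pyGetD B i 0)
    · simp [hp, List.mem_cons, Bool.or_comm]
    · have hb : (pvKeyPair p == pvKeyPair (PySem.List.pyGetD A i 0, PySem.List.pyGetD B i 0)) = false := by
        simp [pvKeyPair, Prod.ext_iff] at hp ⊢
        tauto
      simp [hb, List.mem_cons, hp]

theorem pvHM_contains (A B : List Int) (p : Int × Int) :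
    (pvHM A B).contains (pvKeyPair p) = decide (p ∈ pvPts A B) := by
  have h := (pvHM_fold_contains A B (PySem.List.pyRange 0 (A.length : Int) 1)
    PySem.Dict.empty (by simp)).2 p
  rw [pvHM, h]
  simp [PySem.List.pyRange_one, List.map_map, pvPts, Function.comp]

def pvCStep (A B : List Int) (hm : PySem.Dict (Bool × Int × Int) Int) (i : Int)
    (count : Int) (j : Int) : Int :=
  let third1 := (PySem.List.pyGetD A i 0, PySem.List.pyGetD B j 0)
  let third2 := (PySem.List.pyGetD A j 0, PySem.List.pyGetD B i 0)
  let count :=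
    if third1 ≠ (PySem.List.pyGetD A i 0, PySem.List.pyGetD B i 0) ∧
       third1 ≠ (PySem.List.pyGetD A j 0, PySem.List.pyGetD B j 0) then
      if hm.contains (pvKeyPair third1) then count + 1 else count
    else count
  if third2 ≠ (PySem.List.pyGetD A i 0, PySem.List.pyGetD B i 0) ∧
     third2 ≠ (PySem.List.pyGetD A j 0, PySem.List.pyGetD B j 0) then
    if hm.contains (pvKeyPair third2) then count + 1 else count
  else count

theorem pv_ite_step (c m : Prop) [Decidable c] [Decidable m] (x : Int) :
    (if c then (if m then x + 1 else x) else x) = x + (if c ∧ m then 1 else 0) := by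
  split_ifs <;> simp_all

theorem pvCStep_eq (A B : List Int) (i j : Nat) (c : Int) :
    pvCStep A B (pvHM A B) (i : Int) c (j : Int) = c + (pvF A B i j + pvF A B j i) := by
  unfold pvCStep
  simp only [PySem.List.pyGetD_natCast, pvHM_contains]
  rw [pv_ite_step, pv_ite_step]
  have e1 : ((( (A.getD i 0, B.getD j 0) ≠ (A.getD i 0, B.getD i 0) ∧
        (A.getD i 0, B.getD j 0) ≠ (A.getD j 0, B.getD j 0)) ∧
        (decide ((A.getD i 0, B.getD j 0) ∈ pvPts A B)) = true)
      ↔ ((A.getD i 0, B.getD j 0) ∈ pvPts A B ∧ B.getD j 0 ≠ B.getD i 0 ∧ A.getD i 0 ≠ A.getD j 0)) := by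
    simp only [ne_eq, Prod.mk.injEq, decide_eq_true_eq, true_and, and_true]
    tauto
  have e2 : ((( (A.getD j 0, B.getD i 0) ≠ (A.getD i 0, B.getD i 0) ∧
        (A.getD j 0, B.getD i 0) ≠ (A.getD j 0, B.getD j 0)) ∧
        (decide ((A.getD j 0, B.getD i 0) ∈ pvPts A B)) = true)
      ↔ ((A.getD j 0, B.getD i 0) ∈ pvPts A B ∧ B.getD i 0 ≠ B.getD j 0 ∧ A.getD j 0 ≠ A.getD i 0)) := by
    simp only [ne_eq, Prod.mk.injEq, decide_eq_true_eq, true_and, and_true]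
    tauto
  rw [if_congr e1 rfl rfl, if_congr e2 rfl rfl]
  unfold pvF
  ring

theorem pvInner_eq (A B : List Int) (i : Nat) (c : Int) :
    (PySem.List.pyRange ((i : Int) + 1) (A.length : Int) 1).foldl (pvCStep A B (pvHM A B) (i : Int)) c
      = c + ∑ j ∈ Finset.Ico (i + 1) A.length, (pvF A B i j + pvF A B j i) := by
  rw [PySem.List.pyRange_one, List.foldl_map]
  have ht : (((A.length : Int)) - ((i : Int) + 1)).toNat = A.length - (i + 1) := by omega
  rw [ht]
  have hcong : ∀ (c : Int) (k : Nat), k ∈ List.range (A.length - (i + 1)) →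
      pvCStep A B (pvHM A B) (i : Int) c ((i : Int) + 1 + (k : Int))
        = c + (pvF A B i (i + 1 + k) + pvF A B (i + 1 + k) i) := by
    intro c k _
    have : ((i : Int) + 1 + (k : Int)) = ((i + 1 + k : Nat) : Int) := by push_cast; ring
    rw [this, pvCStep_eq]
  rw [PySem.List.foldl_congr_mem (List.range (A.length - (i + 1))) _
    (fun c k => c + (pvF A B i (i + 1 + k) + pvF A B (i + 1 + k) i)) c hcong]
  rw [PySem.List.foldl_add (List.range (A.length - (i + 1)))
    (fun k => pvF A B i (i + 1 + k) + pvF A B (i + 1 + k) i) c]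
  rw [pv_sum_range_map, Finset.sum_Ico_eq_sum_range]

theorem pvOuterFold (T : Nat → Int) (hT : ∀ i, 0 ≤ T i) (l : List Nat) : ∀ (x : Int),
    (l.foldl (fun (s : Int × Int) i => (s.1 + T i, max s.2 (s.1 + T i))) (x, x))
      = (x + (l.map T).sum, x + (l.map T).sum) := by
  induction l with
  | nil => intro x; simp
  | cons i l ih =>
    intro x
    have h1 : max x (x + T i) = x + T i := by have := hT i; omega
    simp only [List.foldl_cons, h1, ih (x + T i), List.map_cons, List.sum_cons]
    simp [add_assoc]

theorem solve_eq_pvS (A B : List Int) : solve A B = pvS A B := by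
  have hre : solve A B
      = ((PySem.List.pyRange 0 (A.length : Int) 1).foldl (fun (s : Int × Int) i =>
          let c := (PySem.List.pyRange (i + 1) (A.length : Int) 1).foldl
            (pvCStep A B (pvHM A B) i) s.1
          (c, max s.2 c)) ((0 : Int), (0 : Int))).2 := rfl
  rw [hre, PySem.List.pyRange_one, List.foldl_map]
  have ht : (((A.length : Int)) - 0).toNat = A.length := by omega
  rw [ht]
  set T : Nat → Int := fun i => ∑ j ∈ Finset.Ico (i + 1) A.length, (pvF A B i j + pvF A B j i) with hT
  have hTnn : ∀ i, 0 ≤ T i := by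
    intro i
    apply Finset.sum_nonneg
    intro j _
    have : (0:Int) ≤ pvF A B i j := by unfold pvF; split_ifs <;> omega
    have : (0:Int) ≤ pvF A B j i := by unfold pvF; split_ifs <;> omega
    omega
  have hcong : ∀ (s : Int × Int) (i : Nat), i ∈ List.range A.length →
      (fun (s : Int × Int) (i : Nat) =>
        let c := (PySem.List.pyRange ((i : Int) + 1) (A.length : Int) 1).foldl
          (pvCStep A B (pvHM A B) (i : Int)) s.1
        (c, max s.2 c)) s i = (s.1 + T i, max s.2 (s.1 + T i)) := by
    intro s i _
    simp only [pvInner_eq, hT]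
  simp only [zero_add]
  rw [PySem.List.foldl_congr_mem (List.range A.length) _
    (fun (s : Int × Int) (i : Nat) => (s.1 + T i, max s.2 (s.1 + T i))) ((0 : Int), (0 : Int)) hcong]
  rw [pvOuterFold T hTnn (List.range A.length) 0]
  simp only [zero_add]
  rw [pv_sum_range_map, pv_sym (pvF A B) (by intro i; unfold pvF; simp)]
  rfl

-- ----- B side -----

-- ----- B side: counter dicts, the g dict, and inclusion–exclusion -----
theorem pv_gfold (w : Int → Int) (L : List (Int × Int)) (d : PySem.Dict Int Int) (x : Int) :
    (L.foldl (fun g p => g.insert p.1 (g.getD p.1 0 + w p.2)) d).getD x 0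
      = d.getD x 0 + ((L.filter (fun p => p.1 == x)).map (fun p => w p.2)).sum := by
  induction L generalizing d with
  | nil => simp
  | cons p L ih =>
    simp only [List.foldl_cons, ih, List.filter_cons]
    by_cases hx : p.1 = x
    · rw [PySem.Dict.getD_insert, if_pos hx.symm]
      simp [hx]
      ring
    · rw [PySem.Dict.getD_insert, if_neg (fun h => hx h.symm)]
      simp [hx]

theorem pv_memsum (B : List Int) (x : Int) (n : Nat) (D : List (Int × Int)) (hnd : D.Nodup) :
    (∑ j ∈ Finset.range n, if (x, B.getD j 0) ∈ D then (1 : Int) else 0)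
      = ((D.filter (fun p => p.1 == x)).map
          (fun p => (((List.range n).map (fun i => B.getD i 0)).count p.2 : Int))).sum := by
  induction D with
  | nil => simp
  | cons p D ih =>
    have hpD : p ∉ D := (List.nodup_cons.mp hnd).1
    have hnd' : D.Nodup := (List.nodup_cons.mp hnd).2
    have hpt : ∀ j : Nat, (if (x, B.getD j 0) ∈ p :: D then (1 : Int) else 0)
        = (if p = (x, B.getD j 0) then 1 else 0) + (if (x, B.getD j 0) ∈ D then 1 else 0) := by
      intro j
      simp only [List.mem_cons]
      by_cases h1 : p = (x, B.getD j 0)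
      · have h2 : (x, B.getD j 0) ∉ D := h1 ▸ hpD
        rw [if_pos (Or.inl h1.symm), if_pos h1, if_neg h2]
        norm_num
      · by_cases h2 : (x, B.getD j 0) ∈ D
        · rw [if_pos (Or.inr h2), if_neg h1, if_pos h2]
          norm_num
        · rw [if_neg (by rintro (h | h); exacts [h1 h.symm, h2 h]), if_neg h1, if_neg h2]
          norm_num
    rw [Finset.sum_congr rfl (fun j _ => hpt j), Finset.sum_add_distrib, ih hnd',
      List.filter_cons]
    by_cases hpx : p.1 = x
    · have hsum : (∑ j ∈ Finset.range n, if p = (x, B.getD j 0) then (1 : Int) else 0)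
          = (((List.range n).map (fun i => B.getD i 0)).count p.2 : Int) := by
        rw [← pv_sumInd (fun i => B.getD i 0) p.2 n]
        apply Finset.sum_congr rfl
        intro j _
        congr 1
        simp only [eq_iff_iff]
        constructor
        · intro h; rw [h]
        · intro h
          rw [Prod.ext_iff]
          exact ⟨hpx, h.symm⟩
      simp only [hpx, beq_self_eq_true, if_true, List.map_cons, List.sum_cons, hsum]
    · have hz : (∑ j ∈ Finset.range n, if p = (x, B.getD j 0) then (1 : Int) else 0) = 0 := by
        apply Finset.sum_eq_zero
        intro j _
        rw [if_neg]
        intro h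
        exact hpx (by rw [h])
      simp only [hz, zero_add]
      rw [if_neg (by simp [hpx])]

theorem pv_mem_pts (A B : List Int) (k : Nat) (hk : k < A.length) :
    (A.getD k 0, B.getD k 0) ∈ pvPts A B := by
  unfold pvPts
  exact List.mem_map.mpr ⟨k, List.mem_range.mpr hk, rfl⟩

theorem pv_incexc_pt (A B : List Int) (i j : Nat) (hi : i < A.length) (hj : j < A.length) :
    pvF A B i j
      = (if (A.getD i 0, B.getD j 0) ∈ pvPts A B then (1 : Int) else 0)
        - (if B.getD j 0 = B.getD i 0 then (1 : Int) else 0)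
        - (if A.getD j 0 = A.getD i 0 then (1 : Int) else 0)
        + (if (A.getD j 0, B.getD j 0) = (A.getD i 0, B.getD i 0) then (1 : Int) else 0) := by
  have hmi := pv_mem_pts A B i hi
  have hmj := pv_mem_pts A B j hj
  by_cases h1 : A.getD j 0 = A.getD i 0 <;> by_cases h2 : B.getD j 0 = B.getD i 0
  · have hC : (A.getD i 0, B.getD j 0) ∈ pvPts A B := by rw [h2]; exact hmi
    simp only [pvF]
    rw [if_neg (fun h => h.2.1 h2), if_pos hC, if_pos h2, if_pos h1,
      if_pos (Prod.ext_iff.mpr ⟨h1, h2⟩)]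
    norm_num
  · have hC : (A.getD i 0, B.getD j 0) ∈ pvPts A B := by rw [← h1]; exact hmj
    simp only [pvF]
    rw [if_neg (fun h => h.2.2 h1.symm), if_pos hC, if_neg h2, if_pos h1,
      if_neg (fun h => h2 (Prod.ext_iff.mp h).2)]
    norm_num
  · have hC : (A.getD i 0, B.getD j 0) ∈ pvPts A B := by rw [h2]; exact hmi
    simp only [pvF]
    rw [if_neg (fun h => h.2.1 h2), if_pos hC, if_pos h2, if_neg h1,
      if_neg (fun h => h1 (Prod.ext_iff.mp h).1)]
    norm_num
  · simp only [pvF]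
    by_cases hC : (A.getD i 0, B.getD j 0) ∈ pvPts A B
    · rw [if_pos ⟨hC, fun hb => h2 hb, fun ha => h1 ha.symm⟩, if_pos hC, if_neg h2, if_neg h1,
        if_neg (fun h => h1 (Prod.ext_iff.mp h).1)]
      norm_num
    · rw [if_neg (fun h => hC h.1), if_neg hC, if_neg h2, if_neg h1,
        if_neg (fun h => h1 (Prod.ext_iff.mp h).1)]
      norm_num

theorem pv_incexc (A B : List Int) (i : Nat) (hi : i < A.length) :
    (∑ j ∈ Finset.range A.length, pvF A B i j)
      = (∑ j ∈ Finset.range A.length, if (A.getD i 0, B.getD j 0) ∈ pvPts A B then (1 : Int) else 0)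
        - (((List.range A.length).map (fun k => B.getD k 0)).count (B.getD i 0) : Int)
        - (((List.range A.length).map (fun k => A.getD k 0)).count (A.getD i 0) : Int)
        + ((pvPts A B).count (A.getD i 0, B.getD i 0) : Int) := by
  rw [Finset.sum_congr rfl (fun j hj => pv_incexc_pt A B i j hi (List.mem_range.mp hj))]
  rw [Finset.sum_add_distrib, Finset.sum_sub_distrib, Finset.sum_sub_distrib]
  rw [pv_sumInd (fun j => B.getD j 0) (B.getD i 0) A.length,
      pv_sumInd (fun j => A.getD j 0) (A.getD i 0) A.length,
      pv_sumInd (fun j => (A.getD j 0, B.getD j 0)) (A.getD i 0, B.getD i 0) A.length]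
  rfl

theorem pv_gval (A B : List Int) (x : Int) :
    ((PySem.Set.ofList (pvPts A B)).foldl
        (fun g p => g.insert p.1
          (g.getD p.1 0 + (((List.range A.length).map (fun k => B.getD k 0)).count p.2 : Int)))
        PySem.Dict.empty).getD x 0
      = ∑ j ∈ Finset.range A.length, if (x, B.getD j 0) ∈ pvPts A B then (1 : Int) else 0 := by
  rw [pv_gfold (fun y => (((List.range A.length).map (fun k => B.getD k 0)).count y : Int))
    (PySem.Set.ofList (pvPts A B)) PySem.Dict.empty x]
  rw [PySem.Dict.getD_empty, zero_add,
    ← pv_memsum B x A.length (PySem.Set.ofList (pvPts A B)) (PySem.Set.nodup_ofList _)]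
  apply Finset.sum_congr rfl
  intro j _
  congr 1
  simp [PySem.Set.mem_ofList]

theorem solve_alt_eq_pvS (A B : List Int) : solve_alt A B = pvS A B := by
  unfold solve_alt
  dsimp only []
  rw [PySem.List.pyRange_one]
  have ht : (((A.length : Int)) - 0).toNat = A.length := by omega
  rw [ht, List.foldl_map, List.foldl_map]
  simp only [zero_add, PySem.List.pyGetD_natCast]
  rw [PySem.List.foldl_prod_mk
    (f := fun (d : PySem.Dict Int Int) (i : Nat) => d.insert (A.getD i 0) (d.getD (A.getD i 0) 0 + 1))
    (g := fun (pr : PySem.Dict Int Int × PySem.Dict (Int × Int) Int) (i : Nat) =>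
      (pr.1.insert (B.getD i 0) (pr.1.getD (B.getD i 0) 0 + 1),
       pr.2.insert (A.getD i 0, B.getD i 0) (pr.2.getD (A.getD i 0, B.getD i 0) 0 + 1)))]
  rw [PySem.List.foldl_prod_mk
    (f := fun (d : PySem.Dict Int Int) (i : Nat) => d.insert (B.getD i 0) (d.getD (B.getD i 0) 0 + 1))
    (g := fun (d : PySem.Dict (Int × Int) Int) (i : Nat) =>
      d.insert (A.getD i 0, B.getD i 0) (d.getD (A.getD i 0, B.getD i 0) 0 + 1))]
  dsimp only []
  have hA : ∀ v, ((List.range A.length).foldl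
      (fun (d : PySem.Dict Int Int) i => d.insert (A.getD i 0) (d.getD (A.getD i 0) 0 + 1))
      PySem.Dict.empty).getD v 0
      = (((List.range A.length).map (fun k => A.getD k 0)).count v : Int) := by
    intro v
    rw [← List.foldl_map (f := fun i => A.getD i 0) (g := fun (d : PySem.Dict Int Int) x => d.insert x (d.getD x 0 + 1))]
    rw [PySem.Dict.getD_foldl_insert_add_one]
    simp
  have hB : ∀ v, ((List.range A.length).foldl
      (fun (d : PySem.Dict Int Int) i => d.insert (B.getD i 0) (d.getD (B.getD i 0) 0 + 1))
      PySem.Dict.empty).getD v 0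
      = (((List.range A.length).map (fun k => B.getD k 0)).count v : Int) := by
    intro v
    rw [← List.foldl_map (f := fun i => B.getD i 0) (g := fun (d : PySem.Dict Int Int) x => d.insert x (d.getD x 0 + 1))]
    rw [PySem.Dict.getD_foldl_insert_add_one]
    simp
  have hP : ∀ v, ((List.range A.length).foldl
      (fun (d : PySem.Dict (Int × Int) Int) i =>
        d.insert (A.getD i 0, B.getD i 0) (d.getD (A.getD i 0, B.getD i 0) 0 + 1))
      PySem.Dict.empty).getD v 0
      = ((pvPts A B).count v : Int) := by
    intro v
    rw [← List.foldl_map (f := fun i => (A.getD i 0, B.getD i 0))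
      (g := fun (d : PySem.Dict (Int × Int) Int) x => d.insert x (d.getD x 0 + 1))]
    rw [PySem.Dict.getD_foldl_insert_add_one]
    simp [pvPts]
  have hK : ((List.range A.length).foldl
      (fun (d : PySem.Dict (Int × Int) Int) i =>
        d.insert (A.getD i 0, B.getD i 0) (d.getD (A.getD i 0, B.getD i 0) 0 + 1))
      PySem.Dict.empty).keys = PySem.Set.ofList (pvPts A B) := by
    rw [PySem.Dict.keys_foldl_insert_key (List.range A.length)
      (fun i => (A.getD i 0, B.getD i 0))
      (fun (d : PySem.Dict (Int × Int) Int) i => d.getD (A.getD i 0, B.getD i 0) 0 + 1)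
      PySem.Dict.empty]
    rw [PySem.Dict.keys_empty, PySem.Set.update_nil_left]
    rfl
  rw [hK]
  rw [PySem.List.foldl_congr_mem (PySem.Set.ofList (pvPts A B)) _
    (fun (g : PySem.Dict Int Int) (p : Int × Int) => g.insert p.1
      (g.getD p.1 0 + (((List.range A.length).map (fun k => B.getD k 0)).count p.2 : Int)))
    PySem.Dict.empty
    (fun acc xy _ => by rw [hB xy.2])]
  rw [PySem.List.foldl_congr_mem (List.range A.length) _
    (fun (total : Int) (i : Nat) => total +
      ((∑ j ∈ Finset.range A.length, if (A.getD i 0, B.getD j 0) ∈ pvPts A B then (1 : Int) else 0)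
        - (((List.range A.length).map (fun k => B.getD k 0)).count (B.getD i 0) : Int)
        - (((List.range A.length).map (fun k => A.getD k 0)).count (A.getD i 0) : Int)
        + ((pvPts A B).count (A.getD i 0, B.getD i 0) : Int)))
    0
    (fun acc i _ => by rw [pv_gval A B (A.getD i 0), hA, hB, hP]; ring)]
  rw [PySem.List.foldl_add]
  rw [pv_sum_range_map]
  rw [zero_add]
  rw [Finset.sum_congr rfl (fun i hi => (pv_incexc A B i (List.mem_range.mp hi)).symm)]
  rfl

-- ===== VERDICT (by name: the statement is the Claim_ definition above) =====
theorem solve_spec : Claim_equal_solve := by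
  intro A B _ _
  unfold Spec_solve
  rw [solve_eq_pvS, solve_alt_eq_pvS]
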